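-- pv_equiv track=rewrite | github.com/yoderj/five_n_plus_one | help_me.py | full_trace
-- ===== SOURCE A (Python) =====
-- def lookup(first_base, p2, sequence, shift, n):
--     if not n % first_base == sequence[0]:
--         return 0
--     n //= first_base
--     i = 1
--     if i == len(sequence):
--         return -1
--     while n % p2 == sequence[i]:
--         n //= p2
--         i += 1
--         if i == len(sequence):
--             return -1
--     return i + shift
--
-- def full_trace(p1, p2, ord_p1, ord_p2, sequence1, sequence2, shift1, shift2, number):
--     current_string = 1
--     seen1 = set()
--     seen1.add(number)
--     seen2 = set()
--     while not number == 0: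
--         if current_string == 1:
--             number = lookup(ord_p1, p2, sequence1, shift1, number)
--             if number in seen2:
--                 return False
--             seen2.add(number)
--             current_string = 2
--         else:
--             number = lookup(ord_p2, p1, sequence2, shift2, number)
--             if number in seen1:
--                 return False
--             seen1.add(number)
--             current_string = 1
--     return True
-- ===== SOURCE B (Python) =====
-- def full_trace(p1, p2, ord_p1, ord_p2, sequence1, sequence2, shift1, shift2, number):
--     def probe(base, q, seq, shift, n):
--         # staged successor: precompute the remainder stream, then count the matching prefix
--         if n % base != seq[0]:
--             return 0
--         m = n // base
--         rems = []
--         for _ in range(len(seq) - 1):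
--             rems.append(m % q)
--             m //= q
--         i = 1
--         for r, s in zip(rems, seq[1:]):
--             if r != s:
--                 break
--             i += 1
--         return -1 if i == len(seq) else i + shift
--     # Every probe output lies in a set of at most len(seq)+1 values, so a trajectory
--     # reaching 0 does so within limit alternating steps; a longer run has repeated a
--     # (value, parity) state and cycles forever.
--     limit = len(sequence1) + len(sequence2) + 4
--     n, par = number, True
--     for _ in range(limit):
--         if n == 0:
--             return True
--         if par:
--             n = probe(ord_p1, p2, sequence1, shift1, n)
--         else:
--             n = probe(ord_p2, p1, sequence2, shift2, n)
--         par = not par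
--     return n == 0
-- ===== Notes on version B (the rewrite author's own statement) =====
-- stated objective: alternative
-- what changed: Replaces A's two growing seen-sets (O(trace)-space cycle detection) with O(1)-space bounded iteration — since every successor value lies in a set of at most len(seq)+1 numbers, the trajectory reaches 0 within len(sequence1)+len(sequence2)+4 alternating steps or provably cycles forever — and replaces A's single interleaved lookup loop with two staged passes: precompute the remainder stream, then count the matching prefix against seq[1:].
-- outside the precondition, e.g. on full_trace(1, 1, 2, 0, [0], [1], 0, 0, 1): A returns True, B returns True; on full_trace(1, 0, 2, 2, [1], [0], 5, 5, 3): A returns True, B returns True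
import Mathlib
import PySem

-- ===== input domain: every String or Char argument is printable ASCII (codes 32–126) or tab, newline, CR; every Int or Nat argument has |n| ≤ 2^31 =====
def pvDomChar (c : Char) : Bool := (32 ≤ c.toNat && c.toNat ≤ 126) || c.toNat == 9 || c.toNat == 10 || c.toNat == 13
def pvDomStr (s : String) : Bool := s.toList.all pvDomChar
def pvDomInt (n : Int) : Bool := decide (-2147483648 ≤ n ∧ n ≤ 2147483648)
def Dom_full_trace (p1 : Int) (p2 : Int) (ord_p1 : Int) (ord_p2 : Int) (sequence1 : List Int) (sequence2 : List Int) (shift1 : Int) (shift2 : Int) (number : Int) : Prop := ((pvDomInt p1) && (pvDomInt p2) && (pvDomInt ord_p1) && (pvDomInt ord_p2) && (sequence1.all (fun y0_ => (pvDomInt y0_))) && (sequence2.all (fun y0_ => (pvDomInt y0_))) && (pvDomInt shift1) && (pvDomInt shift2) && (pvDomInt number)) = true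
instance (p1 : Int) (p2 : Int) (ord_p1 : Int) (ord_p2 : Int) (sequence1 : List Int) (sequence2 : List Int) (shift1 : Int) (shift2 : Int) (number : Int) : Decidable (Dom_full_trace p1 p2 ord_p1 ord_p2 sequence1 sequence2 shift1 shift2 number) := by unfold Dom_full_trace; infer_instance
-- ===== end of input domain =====

-- B replaces A's two growing seen-sets with O(1)-space bounded iteration of the successor step
-- (len1+len2+4 steps suffice: reach 0 by then or cycle forever), and computes the successor in
-- two staged passes (remainder stream, then matching-prefix count); return value only.

-- ===== PORT A =====
-- the 'while n % p2 == sequence[i]' loop of lookup (i is the loop counter)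
def lookupWhile (p2 : Int) (seq : List Int) (shift : Int) (n : Int) (i : Nat) : Int :=
  if h : i < seq.length then
    if PySem.Int.mod n p2 = seq[i] then
      if i + 1 = seq.length then -1
      else lookupWhile p2 seq shift (PySem.Int.floordiv n p2) (i + 1)
    else (i : Int) + shift
  else (i : Int) + shift  -- Python would IndexError here; callers keep i < seq.length (Pre_ excludes [])
termination_by seq.length - i

def lookup (first_base : Int) (p2 : Int) (seq : List Int) (shift : Int) (n : Int) : Int :=
  if ¬ PySem.Int.mod n first_base = (PySem.List.pyGet? seq 0).getD 0 then 0  -- sequence[0]; IndexError on [] is outside Pre_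
  else if 1 = seq.length then -1
  else lookupWhile p2 seq shift (PySem.Int.floordiv n first_base) 1

-- A's while loop; fuel = sequence1.length + sequence2.length + 4 bounds its iterations
-- (proved in the lemmas: each iteration either stops or visits a fresh (number, parity) state
-- out of at most len1+len2+3 possible ones), so the fuel-0 default is never reached.
def traceLoop (g1 g2 : Int → Int) (fuel : Nat) (number : Int) (cs : Int)
    (seen1 seen2 : PySem.Set Int) : Bool :=
  match fuel with
  | 0 => true
  | fuel + 1 =>
    if number = 0 then true
    else if cs = 1 then
      let n' := g1 number
      if n' ∈ seen2 then false
      else traceLoop g1 g2 fuel n' 2 seen1 (PySem.Set.add seen2 n')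
    else
      let n' := g2 number
      if n' ∈ seen1 then false
      else traceLoop g1 g2 fuel n' 1 (PySem.Set.add seen1 n') seen2

def full_trace (p1 : Int) (p2 : Int) (ord_p1 : Int) (ord_p2 : Int) (sequence1 : List Int) (sequence2 : List Int) (shift1 : Int) (shift2 : Int) (number : Int) : Bool :=
  traceLoop (lookup ord_p1 p2 sequence1 shift1) (lookup ord_p2 p1 sequence2 shift2)
    (sequence1.length + sequence2.length + 4) number 1
    (PySem.Set.add PySem.Set.empty number) PySem.Set.empty

-- ===== PORT B =====
-- Source B's first staged pass: the stream of k successive remainders of m by q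
def remList (q : Int) (m : Int) : Nat → List Int
  | 0 => []
  | k + 1 => PySem.Int.mod m q :: remList q (PySem.Int.floordiv m q) k

-- Source B's second pass: the 'for r, s in zip(rems, seq[1:])' counting loop with break
def matchLen : List Int → List Int → Nat
  | r :: rs, s :: ss => if r = s then matchLen rs ss + 1 else 0
  | _, _ => 0

def probe (base : Int) (q : Int) (seq : List Int) (shift : Int) (n : Int) : Int :=
  if PySem.Int.mod n base ≠ seq.headD 0 then 0  -- seq[0]; IndexError on [] is outside Pre_
  else
    let i := 1 + matchLen (remList q (PySem.Int.floordiv n base) (seq.length - 1)) (seq.drop 1)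
    if i = seq.length then -1 else (i : Int) + shift

-- B's 'for _ in range(limit)' loop with early return on n == 0
def altLoop (g1 g2 : Int → Int) (limit : Nat) (n : Int) (par : Bool) : Bool :=
  match limit with
  | 0 => decide (n = 0)
  | m + 1 =>
    if n = 0 then true
    else if par then altLoop g1 g2 m (g1 n) false
    else altLoop g1 g2 m (g2 n) true

def full_trace_alt (p1 : Int) (p2 : Int) (ord_p1 : Int) (ord_p2 : Int) (sequence1 : List Int) (sequence2 : List Int) (shift1 : Int) (shift2 : Int) (number : Int) : Bool :=
  altLoop (probe ord_p1 p2 sequence1 shift1) (probe ord_p2 p1 sequence2 shift2)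
    (sequence1.length + sequence2.length + 4) number true

-- ===== PRECONDITION & SPEC =====
-- Unless number == 0 (where the loop never runs), Pre_ excludes zero moduli and empty sequences,
-- on which Python's '%', '//' and 'sequence[0]' can raise ZeroDivisionError / IndexError; the
-- exclusion is uniform over the trace, so it also drops inputs where the raising expression is
-- unreachable (e.g. a length-1 sequence never consulting p1/p2, or a trace ending before the
-- second lookup) — on those A returns and B returns the same value (see cites).
def Pre_full_trace (p1 : Int) (p2 : Int) (ord_p1 : Int) (ord_p2 : Int) (sequence1 : List Int) (sequence2 : List Int) (shift1 : Int) (shift2 : Int) (number : Int) : Prop :=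
  number = 0 ∨ (p1 ≠ 0 ∧ p2 ≠ 0 ∧ ord_p1 ≠ 0 ∧ ord_p2 ≠ 0 ∧ sequence1 ≠ [] ∧ sequence2 ≠ [])
instance (p1 : Int) (p2 : Int) (ord_p1 : Int) (ord_p2 : Int) (sequence1 : List Int) (sequence2 : List Int) (shift1 : Int) (shift2 : Int) (number : Int) : Decidable (Pre_full_trace p1 p2 ord_p1 ord_p2 sequence1 sequence2 shift1 shift2 number) := by unfold Pre_full_trace; infer_instance

def pvWitness_full_trace : Int × Int × Int × Int × List Int × List Int × Int × Int × Int :=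
  (1, 1, 2, 2, [1], [1], 0, 0, 0)

def Spec_full_trace (p1 : Int) (p2 : Int) (ord_p1 : Int) (ord_p2 : Int) (sequence1 : List Int) (sequence2 : List Int) (shift1 : Int) (shift2 : Int) (number : Int) (out : Bool) : Prop := out = full_trace_alt p1 p2 ord_p1 ord_p2 sequence1 sequence2 shift1 shift2 number
instance (p1 : Int) (p2 : Int) (ord_p1 : Int) (ord_p2 : Int) (sequence1 : List Int) (sequence2 : List Int) (shift1 : Int) (shift2 : Int) (number : Int) (out : Bool) : Decidable (Spec_full_trace p1 p2 ord_p1 ord_p2 sequence1 sequence2 shift1 shift2 number out) := by unfold Spec_full_trace; infer_instance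

-- ===== CLAIM (what is proved, stated in full; the proofs are below) =====
def Claim_equal_full_trace : Prop := ∀ (p1 : Int) (p2 : Int) (ord_p1 : Int) (ord_p2 : Int) (sequence1 : List Int) (sequence2 : List Int) (shift1 : Int) (shift2 : Int) (number : Int), Dom_full_trace p1 p2 ord_p1 ord_p2 sequence1 sequence2 shift1 shift2 number → Pre_full_trace p1 p2 ord_p1 ord_p2 sequence1 sequence2 shift1 shift2 number → Spec_full_trace p1 p2 ord_p1 ord_p2 sequence1 sequence2 shift1 shift2 number (full_trace p1 p2 ord_p1 ord_p2 sequence1 sequence2 shift1 shift2 number)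

-- ===== LEMMAS AND PROOFS =====

-- the alternating successor on (number, parity) states; parity true = current_string 1
def pvS (g1 g2 : Int → Int) (s : Int × Bool) : Int × Bool :=
  if s.2 then (g1 s.1, false) else (g2 s.1, true)

-- the trajectory from (n0, true)
def pvT (g1 g2 : Int → Int) (n0 : Int) (k : Nat) : Int × Bool := (pvS g1 g2)^[k] (n0, true)

theorem pvT_succ (g1 g2 : Int → Int) (n0 : Int) (k : Nat) :
    pvT g1 g2 n0 (k + 1) = pvS g1 g2 (pvT g1 g2 n0 k) := by
  simp [pvT, Function.iterate_succ_apply']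

-- a repeated state traps the trajectory inside the window [a, c)
theorem pvT_period (g1 g2 : Int → Int) (n0 : Int) {a c : Nat} (hac : a < c)
    (heq : pvT g1 g2 n0 c = pvT g1 g2 n0 a) :
    ∀ m, a ≤ m → ∃ i, a ≤ i ∧ i < c ∧ pvT g1 g2 n0 m = pvT g1 g2 n0 i := by
  intro m hm
  induction m, hm using Nat.le_induction with
  | base => exact ⟨a, le_refl a, hac, rfl⟩
  | succ m hm ih =>
    obtain ⟨i, hai, hic, he⟩ := ih
    by_cases h : i + 1 < c
    · exact ⟨i + 1, by omega, h, by rw [pvT_succ, pvT_succ, he]⟩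
    · have hic' : i + 1 = c := by omega
      exact ⟨a, le_refl a, hac, by rw [pvT_succ, he, ← pvT_succ, hic', heq]⟩

-- B's loop returns true iff the trajectory hits 0 within the limit
theorem altLoop_iff (g1 g2 : Int → Int) :
    ∀ (limit : Nat) (n : Int) (b : Bool),
    (altLoop g1 g2 limit n b = true ↔ ∃ k, k ≤ limit ∧ ((pvS g1 g2)^[k] (n, b)).1 = 0) := by
  intro limit
  induction limit with
  | zero =>
    intro n b
    constructor
    · intro h
      exact ⟨0, le_refl 0, by simpa [altLoop] using h⟩
    · rintro ⟨k, hk, h0⟩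
      interval_cases k
      simpa [altLoop] using h0
  | succ m ih =>
    intro n b
    by_cases hn : n = 0
    · subst hn
      simp only [altLoop]
      exact iff_of_true (by simp) ⟨0, by omega, rfl⟩
    · have hstep : altLoop g1 g2 (m + 1) n b
          = altLoop g1 g2 m ((pvS g1 g2 (n, b)).1) ((pvS g1 g2 (n, b)).2) := by
        cases b <;> simp [altLoop, hn, pvS]
      rw [hstep, ih]
      constructor
      · rintro ⟨k, hk, h0⟩
        refine ⟨k + 1, by omega, ?_⟩
        rwa [Function.iterate_succ_apply]
      · rintro ⟨k, hk, h0⟩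
        match k with
        | 0 => exact absurd h0 hn
        | k + 1 =>
          refine ⟨k, by omega, ?_⟩
          rwa [Function.iterate_succ_apply] at h0

-- main invariant for A's loop: with the seen-sets recording exactly the numbers visited at each
-- parity on a so-far repeat-free, nonzero trajectory, the loop answers "does the trajectory hit 0"
theorem traceLoop_iff (g1 g2 : Int → Int) (n0 : Int) (B : Nat)
    (HB : ∀ u, (∀ i j, i ≤ u → j ≤ u → pvT g1 g2 n0 i = pvT g1 g2 n0 j → i = j) → u ≤ B) :
    ∀ (fuel t : Nat) (number cs : Int) (s1 s2 : PySem.Set Int),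
    t + fuel = B + 2 →
    (cs = 1 ∨ cs = 2) →
    pvT g1 g2 n0 t = (number, decide (cs = 1)) →
    (∀ x, x ∈ s1 ↔ ∃ j, j ≤ t ∧ pvT g1 g2 n0 j = (x, true)) →
    (∀ x, x ∈ s2 ↔ ∃ j, j ≤ t ∧ pvT g1 g2 n0 j = (x, false)) →
    (∀ i j, i ≤ t → j ≤ t → pvT g1 g2 n0 i = pvT g1 g2 n0 j → i = j) →
    (∀ j, j < t → (pvT g1 g2 n0 j).1 ≠ 0) →
    (traceLoop g1 g2 fuel number cs s1 s2 = true ↔ ∃ k, (pvT g1 g2 n0 k).1 = 0) := by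
  intro fuel
  induction fuel with
  | zero =>
    intro t number cs s1 s2 hsum hcs hstate h1 h2 hinj hnz
    exact absurd (HB t hinj) (by omega)
  | succ fuel ih =>
    intro t number cs s1 s2 hsum hcs hstate h1 h2 hinj hnz
    rw [traceLoop]
    by_cases hn0 : number = 0
    · simp only [if_pos hn0]
      exact iff_of_true (by trivial) ⟨t, by rw [hstate]; exact hn0⟩
    · rw [if_neg hn0]
      have hwin : ∀ i, i ≤ t → (pvT g1 g2 n0 i).1 ≠ 0 := by
        intro i hit
        rcases Nat.lt_or_ge i t with h | h
        · exact hnz i h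
        · have hit' : i = t := by omega
          rw [hit', hstate]; exact hn0
      rcases hcs with hcs | hcs
      · subst hcs
        rw [if_pos rfl]
        rw [show (decide ((1 : Int) = 1)) = true from by decide] at hstate
        have hnext : pvT g1 g2 n0 (t + 1) = (g1 number, false) := by
          rw [pvT_succ, hstate]; simp [pvS]
        by_cases hmem : g1 number ∈ s2
        · rw [if_pos hmem]
          obtain ⟨j, hj, hje⟩ := (h2 _).1 hmem
          have heq : pvT g1 g2 n0 (t + 1) = pvT g1 g2 n0 j := by rw [hnext, hje]
          simp only [Bool.false_eq_true, false_iff, not_exists]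
          intro k hk
          rcases Nat.lt_or_ge k j with h | h
          · exact hwin k (by omega) hk
          · obtain ⟨i, hji, hij, he⟩ := pvT_period g1 g2 n0 (show j < t + 1 by omega) heq k h
            rw [he] at hk
            exact hwin i (by omega) hk
        · rw [if_neg hmem]
          refine ih (t + 1) (g1 number) 2 s1 (PySem.Set.add s2 (g1 number)) (by omega)
            (Or.inr rfl)
            (by rw [hnext, show (decide ((2 : Int) = 1)) = false from by decide])
            ?_ ?_ ?_ ?_
          · intro x
            rw [h1 x]
            constructor
            · rintro ⟨j, hj, he⟩
              exact ⟨j, by omega, he⟩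
            · rintro ⟨j, hj, he⟩
              rcases Nat.lt_or_ge j (t + 1) with h | h
              · exact ⟨j, by omega, he⟩
              · have hj' : j = t + 1 := by omega
                rw [hj', hnext] at he
                simp at he
          · intro x
            rw [PySem.Set.mem_add, h2 x]
            constructor
            · rintro (⟨j, hj, he⟩ | rfl)
              · exact ⟨j, by omega, he⟩
              · exact ⟨t + 1, le_refl _, hnext⟩
            · rintro ⟨j, hj, he⟩
              rcases Nat.lt_or_ge j (t + 1) with h | h
              · exact Or.inl ⟨j, by omega, he⟩
              · have hj' : j = t + 1 := by omega
                rw [hj', hnext] at he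
                injection he with h1 h2
                exact Or.inr h1.symm
          · intro i j hi hj he
            rcases Nat.lt_or_ge i (t + 1) with hi' | hi' <;>
              rcases Nat.lt_or_ge j (t + 1) with hj' | hj'
            · exact hinj i j (by omega) (by omega) he
            · have hj'' : j = t + 1 := by omega
              subst hj''
              exact absurd ((h2 _).2 ⟨i, by omega, by rw [he, hnext]⟩) hmem
            · have hi'' : i = t + 1 := by omega
              subst hi''
              exact absurd ((h2 _).2 ⟨j, by omega, by rw [← he, hnext]⟩) hmem
            · omega
          · intro j hj
            exact hwin j (by omega)
      · subst hcs
        rw [if_neg (by norm_num)]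
        rw [show (decide ((2 : Int) = 1)) = false from by decide] at hstate
        have hnext : pvT g1 g2 n0 (t + 1) = (g2 number, true) := by
          rw [pvT_succ, hstate]; simp [pvS]
        by_cases hmem : g2 number ∈ s1
        · rw [if_pos hmem]
          obtain ⟨j, hj, hje⟩ := (h1 _).1 hmem
          have heq : pvT g1 g2 n0 (t + 1) = pvT g1 g2 n0 j := by rw [hnext, hje]
          simp only [Bool.false_eq_true, false_iff, not_exists]
          intro k hk
          rcases Nat.lt_or_ge k j with h | h
          · exact hwin k (by omega) hk
          · obtain ⟨i, hji, hij, he⟩ := pvT_period g1 g2 n0 (show j < t + 1 by omega) heq k h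
            rw [he] at hk
            exact hwin i (by omega) hk
        · rw [if_neg hmem]
          refine ih (t + 1) (g2 number) 1 (PySem.Set.add s1 (g2 number)) s2 (by omega)
            (Or.inl rfl)
            (by rw [hnext, show (decide ((1 : Int) = 1)) = true from by decide])
            ?_ ?_ ?_ ?_
          · intro x
            rw [PySem.Set.mem_add, h1 x]
            constructor
            · rintro (⟨j, hj, he⟩ | rfl)
              · exact ⟨j, by omega, he⟩
              · exact ⟨t + 1, le_refl _, hnext⟩
            · rintro ⟨j, hj, he⟩
              rcases Nat.lt_or_ge j (t + 1) with h | h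
              · exact Or.inl ⟨j, by omega, he⟩
              · have hj' : j = t + 1 := by omega
                rw [hj', hnext] at he
                injection he with h1 h2
                exact Or.inr h1.symm
          · intro x
            rw [h2 x]
            constructor
            · rintro ⟨j, hj, he⟩
              exact ⟨j, by omega, he⟩
            · rintro ⟨j, hj, he⟩
              rcases Nat.lt_or_ge j (t + 1) with h | h
              · exact ⟨j, by omega, he⟩
              · have hj' : j = t + 1 := by omega
                rw [hj', hnext] at he
                simp at he
          · intro i j hi hj he
            rcases Nat.lt_or_ge i (t + 1) with hi' | hi' <;>
              rcases Nat.lt_or_ge j (t + 1) with hj' | hj'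
            · exact hinj i j (by omega) (by omega) he
            · have hj'' : j = t + 1 := by omega
              subst hj''
              exact absurd ((h1 _).2 ⟨i, by omega, by rw [he, hnext]⟩) hmem
            · have hi'' : i = t + 1 := by omega
              subst hi''
              exact absurd ((h1 _).2 ⟨j, by omega, by rw [← he, hnext]⟩) hmem
            · omega
          · intro j hj
            exact hwin j (by omega)

-- the possible outputs of lookup on a nonempty sequence: a finite set of ≤ len+1 numbers
def pvRange (seq : List Int) (shift : Int) : Finset Int :=
  insert 0 (insert (-1) ((Finset.Icc 1 (seq.length - 1)).image fun i : Nat => (i : Int) + shift))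

theorem lookupWhile_mem (p2 : Int) (seq : List Int) (shift : Int) :
    ∀ (k i : Nat) (n : Int), seq.length - i ≤ k → 1 ≤ i → i < seq.length →
    lookupWhile p2 seq shift n i ∈ pvRange seq shift := by
  intro k
  induction k with
  | zero =>
    intro i n hk h1 h2
    omega
  | succ k ih =>
    intro i n hk h1 h2
    rw [lookupWhile, dif_pos h2]
    by_cases hm : PySem.Int.mod n p2 = seq[i]'h2
    · rw [if_pos hm]
      by_cases he : i + 1 = seq.length
      · rw [if_pos he]
        simp [pvRange]
      · rw [if_neg he]
        exact ih (i + 1) _ (by omega) (by omega) (by omega)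
    · rw [if_neg hm]
      simp only [pvRange, Finset.mem_insert, Finset.mem_image, Finset.mem_Icc]
      exact Or.inr (Or.inr ⟨i, ⟨h1, by omega⟩, rfl⟩)

theorem lookup_mem (fb p2 : Int) (seq : List Int) (shift : Int) (hseq : seq ≠ []) (n : Int) :
    lookup fb p2 seq shift n ∈ pvRange seq shift := by
  have hlen : 1 ≤ seq.length := List.length_pos_iff.mpr hseq
  rw [lookup]
  by_cases h0 : PySem.Int.mod n fb = (PySem.List.pyGet? seq 0).getD 0
  · rw [if_neg (by simpa using h0)]
    by_cases h1 : 1 = seq.length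
    · rw [if_pos h1]
      simp [pvRange]
    · rw [if_neg h1]
      exact lookupWhile_mem p2 seq shift seq.length 1 _ (by omega) (le_refl 1) (by omega)
  · rw [if_pos (by simpa using h0)]
    simp [pvRange]

theorem pvRange_card (seq : List Int) (shift : Int) (hseq : seq ≠ []) :
    (pvRange seq shift).card ≤ seq.length + 1 := by
  have hlen : 1 ≤ seq.length := List.length_pos_iff.mpr hseq
  calc (pvRange seq shift).card
      ≤ ((insert (-1) ((Finset.Icc 1 (seq.length - 1)).image fun i : Nat => (i : Int) + shift)).card) + 1 :=
        Finset.card_insert_le _ _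
    _ ≤ ((Finset.Icc 1 (seq.length - 1)).image fun i : Nat => (i : Int) + shift).card + 1 + 1 := by
        have := Finset.card_insert_le (-1 : Int) ((Finset.Icc 1 (seq.length - 1)).image fun i : Nat => (i : Int) + shift)
        omega
    _ ≤ (Finset.Icc 1 (seq.length - 1)).card + 1 + 1 := by
        have := Finset.card_image_le (s := Finset.Icc 1 (seq.length - 1)) (f := fun i : Nat => (i : Int) + shift)
        omega
    _ ≤ seq.length + 1 := by
        rw [Nat.card_Icc]
        omega

-- pigeonhole: state-injectivity of the trajectory bounds its length by the range sizes
theorem pv_bound (g1 g2 : Int → Int) (n0 : Int) (S1 S2 : Finset Int)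
    (hg1 : ∀ n, g1 n ∈ S1) (hg2 : ∀ n, g2 n ∈ S2) :
    ∀ u, (∀ i j, i ≤ u → j ≤ u → pvT g1 g2 n0 i = pvT g1 g2 n0 j → i = j) →
      u ≤ S1.card + S2.card := by
  intro u hinj
  have hmem : ∀ m ∈ Finset.Icc 1 u, pvT g1 g2 n0 m ∈ (S1 ×ˢ ({false} : Finset Bool)) ∪ (S2 ×ˢ {true}) := by
    intro m hm
    rw [Finset.mem_Icc] at hm
    obtain ⟨m', rfl⟩ : ∃ m', m = m' + 1 := ⟨m - 1, by omega⟩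
    rw [pvT_succ]
    rcases h : pvT g1 g2 n0 m' with ⟨x, b⟩
    cases b
    · simp only [pvS, Finset.mem_union, Finset.mem_product, Finset.mem_singleton]
      exact Or.inr ⟨hg2 x, rfl⟩
    · simp only [pvS, Finset.mem_union, Finset.mem_product, Finset.mem_singleton]
      exact Or.inl ⟨hg1 x, rfl⟩
  have hcard := Finset.card_le_card_of_injOn (pvT g1 g2 n0) hmem ?_
  · have h1 : (Finset.Icc 1 u).card = u := by rw [Nat.card_Icc]; omega
    have h2 := Finset.card_union_le (S1 ×ˢ ({false} : Finset Bool)) (S2 ×ˢ ({true} : Finset Bool))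
    simp only [Finset.card_product, Finset.card_singleton, mul_one] at h2
    omega
  · intro i hi j hj he
    rw [Finset.mem_coe, Finset.mem_Icc] at hi hj
    exact hinj i j (by omega) (by omega) he

-- A's lookup-loop equals B's staged remainder-stream / prefix-count computation
theorem lookupWhile_eq_staged (q : Int) (seq : List Int) (shift : Int) :
    ∀ (k i : Nat) (n : Int), seq.length - i ≤ k → i < seq.length →
    lookupWhile q seq shift n i =
      (if i + matchLen (remList q n (seq.length - i)) (seq.drop i) = seq.length then -1
       else ((i + matchLen (remList q n (seq.length - i)) (seq.drop i) : Nat) : Int) + shift) := by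
  intro k
  induction k with
  | zero =>
    intro i n hk hlt
    omega
  | succ k ih =>
    intro i n hk hlt
    have hrem : seq.length - i = (seq.length - (i + 1)) + 1 := by omega
    have hdrop : seq.drop i = seq[i]'hlt :: seq.drop (i + 1) := List.drop_eq_getElem_cons hlt
    rw [lookupWhile, dif_pos hlt, hrem, hdrop]
    simp only [remList, matchLen]
    by_cases hm : PySem.Int.mod n q = seq[i]'hlt
    · rw [if_pos hm, if_pos hm]
      by_cases he : i + 1 = seq.length
      · rw [if_pos he]
        have h0 : seq.length - (i + 1) = 0 := by omega
        rw [h0]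
        have : matchLen (remList q (PySem.Int.floordiv n q) 0) (seq.drop (i + 1)) = 0 := by
          cases seq.drop (i + 1) <;> simp [remList, matchLen]
        rw [this, if_pos (by omega)]
      · rw [if_neg he, ih (i + 1) _ (by omega) (by omega)]
        have harith : i + (matchLen (remList q (PySem.Int.floordiv n q) (seq.length - (i + 1))) (seq.drop (i + 1)) + 1)
            = (i + 1) + matchLen (remList q (PySem.Int.floordiv n q) (seq.length - (i + 1))) (seq.drop (i + 1)) := by omega
        rw [harith]
    · rw [if_neg hm, if_neg hm]
      rw [if_neg (by omega)]
      simp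
theorem probe_eq_lookup (base q : Int) (seq : List Int) (shift : Int) (n : Int) :
    probe base q seq shift n = lookup base q seq shift n := by
  have hhead : (PySem.List.pyGet? seq 0).getD 0 = seq.headD 0 := by
    cases seq <;> simp [PySem.List.pyGet?, PySem.List.pyIdx?]
  match seq with
  | [] =>
    by_cases hm : PySem.Int.mod n base = 0
    · simp [probe, lookup, PySem.List.pyGet?, PySem.List.pyIdx?, hm, remList, matchLen, lookupWhile]
    · simp [probe, lookup, PySem.List.pyGet?, PySem.List.pyIdx?, hm]
  | [a] =>
    by_cases hm : PySem.Int.mod n base = a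
    · simp [probe, lookup, PySem.List.pyGet?, PySem.List.pyIdx?, hm, remList, matchLen]
    · simp [probe, lookup, PySem.List.pyGet?, PySem.List.pyIdx?, hm]
  | a :: b :: rest =>
    by_cases hm : PySem.Int.mod n base = a
    · have hm' : PySem.Int.mod n base = (a :: b :: rest).headD 0 := by simpa using hm
      have h1ne : ¬ ((1 : Nat) = (a :: b :: rest).length) := by simp
      have hlen : (1 : Nat) < (a :: b :: rest).length := by simp
      rw [probe, lookup, hhead, if_neg (not_not_intro hm'), if_neg (not_not_intro hm'),
        if_neg h1ne,
        lookupWhile_eq_staged q (a :: b :: rest) shift (a :: b :: rest).length 1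
          (PySem.Int.floordiv n base) (by omega) hlen]
    · have hm' : ¬ PySem.Int.mod n base = (a :: b :: rest).headD 0 := by simpa using hm
      rw [probe, lookup, hhead, if_pos hm', if_pos hm']

-- if the trajectory ever hits 0 it already does so within B + 2 steps
theorem reach_bounded (g1 g2 : Int → Int) (n0 : Int) (B : Nat)
    (HB : ∀ u, (∀ i j, i ≤ u → j ≤ u → pvT g1 g2 n0 i = pvT g1 g2 n0 j → i = j) → u ≤ B) :
    ((∃ k, k ≤ B + 2 ∧ (pvT g1 g2 n0 k).1 = 0) ↔ (∃ k, (pvT g1 g2 n0 k).1 = 0)) := by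
  constructor
  · rintro ⟨k, _, h0⟩
    exact ⟨k, h0⟩
  · intro h
    have hP := Nat.find_spec h
    set k0 := Nat.find h with hk0
    refine ⟨k0, ?_, hP⟩
    by_contra hbig
    push_neg at hbig
    have hni : ¬ (∀ i j, i ≤ B + 1 → j ≤ B + 1 → pvT g1 g2 n0 i = pvT g1 g2 n0 j → i = j) := by
      intro hi
      exact absurd (HB (B + 1) hi) (by omega)
    push_neg at hni
    obtain ⟨i, j, hi, hj, he, hij⟩ := hni
    rcases Nat.lt_or_ge i j with hlt | hge
    · obtain ⟨m, hm1, hm2, hme⟩ := pvT_period g1 g2 n0 hlt he.symm k0 (by omega)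
      rw [hme] at hP
      exact absurd hP (Nat.find_min h (by omega))
    · have hlt : j < i := by omega
      obtain ⟨m, hm1, hm2, hme⟩ := pvT_period g1 g2 n0 hlt he k0 (by omega)
      rw [hme] at hP
      exact absurd hP (Nat.find_min h (by omega))

-- ===== VERDICT (by name: the statement is the Claim_ definition above) =====
theorem full_trace_spec : Claim_equal_full_trace := by
  intro p1 p2 ord_p1 ord_p2 sequence1 sequence2 shift1 shift2 number _hdom hpre
  unfold Spec_full_trace full_trace full_trace_alt
  rcases hpre with hnum0 | ⟨hp1, hp2, ho1, ho2, hs1, hs2⟩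
  · subst hnum0
    show traceLoop _ _ ((sequence1.length + sequence2.length + 3) + 1) 0 1 _ _
        = altLoop _ _ ((sequence1.length + sequence2.length + 3) + 1) 0 true
    rw [traceLoop, altLoop, if_pos rfl, if_pos rfl]
  rw [funext (probe_eq_lookup ord_p1 p2 sequence1 shift1),
      funext (probe_eq_lookup ord_p2 p1 sequence2 shift2)]
  set g1 := lookup ord_p1 p2 sequence1 shift1 with hg1def
  set g2 := lookup ord_p2 p1 sequence2 shift2 with hg2def
  have HB : ∀ u, (∀ i j, i ≤ u → j ≤ u → pvT g1 g2 number i = pvT g1 g2 number j → i = j) →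
      u ≤ sequence1.length + sequence2.length + 2 := by
    intro u hu
    have hb := pv_bound g1 g2 number (pvRange sequence1 shift1) (pvRange sequence2 shift2)
      (lookup_mem ord_p1 p2 sequence1 shift1 hs1) (lookup_mem ord_p2 p1 sequence2 shift2 hs2) u hu
    have c1 := pvRange_card sequence1 shift1 hs1
    have c2 := pvRange_card sequence2 shift2 hs2
    omega
  have hA := traceLoop_iff g1 g2 number (sequence1.length + sequence2.length + 2) HB
    (sequence1.length + sequence2.length + 4) 0 number 1
    (PySem.Set.add PySem.Set.empty number) PySem.Set.empty
    (by omega) (Or.inl rfl) rfl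
    (by
      intro x
      constructor
      · intro hx
        refine ⟨0, le_refl 0, ?_⟩
        have : x = number := by simpa [PySem.Set.add, PySem.Set.empty, PySem.Set.contains] using hx
        simp [pvT, this]
      · rintro ⟨j, hj, he⟩
        interval_cases j
        have : x = number := by
          have := congrArg Prod.fst he
          simpa [pvT] using this.symm
        simp [this, PySem.Set.add, PySem.Set.empty, PySem.Set.contains])
    (by
      intro x
      constructor
      · intro hx
        simp [PySem.Set.empty] at hx
      · rintro ⟨j, hj, he⟩
        interval_cases j
        have := congrArg Prod.snd he
        simp [pvT] at this)
    (by intro i j hi hj _; omega)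
    (by intro j hj; omega)
  have hB := altLoop_iff g1 g2 (sequence1.length + sequence2.length + 4) number true
  have hbd := reach_bounded g1 g2 number (sequence1.length + sequence2.length + 2) HB
  have : (∃ k, k ≤ sequence1.length + sequence2.length + 4 ∧ ((pvS g1 g2)^[k] (number, true)).1 = 0)
      ↔ (∃ k, (pvT g1 g2 number k).1 = 0) := by
    have h24 : sequence1.length + sequence2.length + 2 + 2 = sequence1.length + sequence2.length + 4 := by omega
    rw [← h24] at hB ⊢
    exact hbd
  rw [Bool.eq_iff_iff, hA, hB]
  exact this.symm
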